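-- pv_equiv track=rewrite | github.com/SDET-SOLOMAN/code_wars_python | kata_6s/pirate_ahhhhhhhhhh.py | grabscrab4
-- ===== SOURCE A (Python) =====
-- make_d = lambda x: {k: x.count(k) for k in x}
--
-- def grabscrab4(s, p):
--     s = {k: s.count(k) for k in s}
--     p1 = [make_d(x) for x in p]
--     r = []
--
--     for num in range(len(p)):
--
--         check = True
--
--         for k, v in p1[num].items():
--             if k not in s or v != s[k]:
--                 check = False
--                 break
--
--         for k, v in s.items():
--             if k not in p1[num] or v != p1[num][k]:
--                 check = False
--                 break
--
--         if check:
--             r.append(p[num])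
--
--     return r
-- ===== SOURCE B (Python) =====
-- def grabscrab4(s, p):
--     target = sorted(s)
--     return [w for w in p if sorted(w) == target]
-- ===== Notes on version B (the rewrite author's own statement) =====
-- stated objective: faster
-- what changed: Replaces A's per-word character-count dictionaries (built with quadratic str.count) and two-way key/value dict comparison by a single sorted-character-sequence comparison per word, with sorted(s) computed once.
import Mathlib
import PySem

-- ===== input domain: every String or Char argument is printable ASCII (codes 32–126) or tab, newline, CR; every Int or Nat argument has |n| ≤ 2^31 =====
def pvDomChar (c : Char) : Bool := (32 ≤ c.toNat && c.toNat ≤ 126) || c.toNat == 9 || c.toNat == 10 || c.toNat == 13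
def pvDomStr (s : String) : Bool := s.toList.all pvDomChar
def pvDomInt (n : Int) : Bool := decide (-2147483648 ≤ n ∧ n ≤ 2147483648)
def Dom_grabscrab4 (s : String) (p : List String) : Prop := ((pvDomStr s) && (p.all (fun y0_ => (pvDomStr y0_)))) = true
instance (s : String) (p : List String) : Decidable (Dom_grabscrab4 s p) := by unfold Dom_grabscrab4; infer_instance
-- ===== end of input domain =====

-- B replaces A's per-word count-dictionaries and two-way dict comparison by one
-- sorted-character-sequence comparison per word, sorted(s) computed once (objective: faster, measured).

-- ===== PORT A =====
-- make_d = lambda x: {k: x.count(k) for k in x}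
def pvMakeD (x : List Char) : PySem.Dict Char Int :=
  x.foldl (fun d k => d.insert k ((PySem.List.count x k : Nat) : Int)) PySem.Dict.empty

-- 'for k, v in it: if k not in other or v != other[k]: check = False; break'
def pvCheckLoop (it : List (Char × Int)) (other : PySem.Dict Char Int) : Bool :=
  match it with
  | [] => true
  | (k, v) :: rest =>
    match other.get? k with
    | none => false
    | some ov => if v ≠ ov then false else pvCheckLoop rest other

def grabscrab4 (s : String) (p : List String) : List String :=
  let sD := pvMakeD s.toList
  let p1 := p.map (fun x => pvMakeD x.toList)
  (PySem.List.pyRange 0 (PySem.List.len p) 1).foldl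
    (fun r num =>
      let pd := PySem.List.pyGetD p1 num (pvMakeD "".toList)  -- index always in range
      let check := pvCheckLoop pd.items sD && pvCheckLoop sD.items pd
      if check then r ++ [PySem.List.pyGetD p num ""] else r) []

-- ===== PORT B =====
def grabscrab4_alt (s : String) (p : List String) : List String :=
  let target := PySem.List.sorted s.toList (fun c => c) false
  p.filter (fun w => PySem.List.sorted w.toList (fun c => c) false == target)

-- ===== PRECONDITION & SPEC =====
def Spec_grabscrab4 (s : String) (p : List String) (out : List String) : Prop := out = grabscrab4_alt s p
instance (s : String) (p : List String) (out : List String) : Decidable (Spec_grabscrab4 s p out) := by unfold Spec_grabscrab4; infer_instance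

-- ===== CLAIM (what is proved, stated in full; the proofs are below) =====
def Claim_equal_grabscrab4 : Prop := ∀ (s : String) (p : List String), Dom_grabscrab4 s p → Spec_grabscrab4 s p (grabscrab4 s p)

-- ===== LEMMAS AND PROOFS =====

theorem pvCheckLoop_eq_all (it : List (Char × Int)) (other : PySem.Dict Char Int) :
    pvCheckLoop it other = it.all (fun kv => other.get? kv.1 == some kv.2) := by
  induction it with
  | nil => rfl
  | cons kv rest ih =>
    obtain ⟨k, v⟩ := kv
    simp only [pvCheckLoop, List.all_cons]
    cases h : other.get? k with
    | none => simp
    | some ov =>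
      by_cases hv : v = ov
      · subst hv; simp [ih]
      · simp [hv, Ne.symm hv]

theorem get?_foldl_insert_const (f : Char → Int) (c : Char) :
    ∀ (l : List Char) (d : PySem.Dict Char Int),
      (l.foldl (fun d k => d.insert k (f k)) d).get? c
        = if c ∈ l then some (f c) else d.get? c := by
  intro l
  induction l with
  | nil => intro d; simp
  | cons k rest ih =>
    intro d
    rw [List.foldl_cons, ih]
    by_cases hm : c ∈ rest
    · simp [hm]
    · by_cases hc : c = k
      · subst hc; simp [hm, PySem.Dict.get?_insert_self]
      · simp [hm, hc, PySem.Dict.get?_insert_of_ne _ _ hc]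

theorem get?_pvMakeD (x : List Char) (c : Char) :
    (pvMakeD x).get? c = if c ∈ x then some ((x.count c : Nat) : Int) else none := by
  have := get?_foldl_insert_const (fun k => ((x.count k : Nat) : Int)) c x PySem.Dict.empty
  simpa [pvMakeD, PySem.List.count_eq] using this

theorem nodup_keys_pvMakeD (x : List Char) : (pvMakeD x).keys.Nodup := by
  have := PySem.Dict.nodup_keys_foldl_insert x
      (fun _ k => ((x.count k : Nat) : Int)) PySem.Dict.empty (by simp)
  simpa [pvMakeD] using this

theorem check_iff_perm (w s : List Char) :
    (pvCheckLoop (pvMakeD w).items (pvMakeD s) && pvCheckLoop (pvMakeD s).items (pvMakeD w)) = true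
      ↔ w.Perm s := by
  rw [Bool.and_eq_true, pvCheckLoop_eq_all, pvCheckLoop_eq_all, List.all_eq_true, List.all_eq_true]
  constructor
  · rintro ⟨h1, h2⟩
    rw [List.perm_iff_count]
    intro c
    by_cases hw : c ∈ w
    · have hm : ((c, ((w.count c : Nat) : Int))) ∈ (pvMakeD w).items := by
        rw [← PySem.Dict.get?_eq_some_iff_mem_items _ _ _ (nodup_keys_pvMakeD w)]
        simp [get?_pvMakeD, hw]
      have := h1 _ hm
      simp only [get?_pvMakeD, beq_iff_eq] at this
      split_ifs at this with hs
      · simp only [Option.some.injEq] at this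
        exact_mod_cast this.symm
    · by_cases hs : c ∈ s
      · have hm : ((c, ((s.count c : Nat) : Int))) ∈ (pvMakeD s).items := by
          rw [← PySem.Dict.get?_eq_some_iff_mem_items _ _ _ (nodup_keys_pvMakeD s)]
          simp [get?_pvMakeD, hs]
        have := h2 _ hm
        simp [get?_pvMakeD, hw] at this
      · rw [List.count_eq_zero_of_not_mem hw, List.count_eq_zero_of_not_mem hs]
  · intro hp
    have hcnt : ∀ c, w.count c = s.count c := List.perm_iff_count.mp hp
    constructor
    · intro kv hm
      rw [← PySem.Dict.get?_eq_some_iff_mem_items _ _ _ (nodup_keys_pvMakeD w)] at hm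
      rw [get?_pvMakeD] at hm
      split_ifs at hm with hw
      · obtain ⟨k, v⟩ := kv
        simp only [Option.some.injEq] at hm
        have hks : k ∈ s := by
          have : 0 < s.count k := by rw [← hcnt]; exact List.count_pos_iff.mpr hw
          exact List.count_pos_iff.mp this
        simp [get?_pvMakeD, hks, ← hm, hcnt k]
    · intro kv hm
      rw [← PySem.Dict.get?_eq_some_iff_mem_items _ _ _ (nodup_keys_pvMakeD s)] at hm
      rw [get?_pvMakeD] at hm
      split_ifs at hm with hs
      · obtain ⟨k, v⟩ := kv
        simp only [Option.some.injEq] at hm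
        have hkw : k ∈ w := by
          have : 0 < w.count k := by rw [hcnt]; exact List.count_pos_iff.mpr hs
          exact List.count_pos_iff.mp this
        simp [get?_pvMakeD, hkw, ← hm, hcnt k]

theorem check_eq_sorted (w s : List Char) :
    (pvCheckLoop (pvMakeD w).items (pvMakeD s) && pvCheckLoop (pvMakeD s).items (pvMakeD w))
      = ((PySem.List.sorted w (fun c => c) false) == (PySem.List.sorted s (fun c => c) false)) := by
  rw [Bool.eq_iff_iff, check_iff_perm, beq_iff_eq, PySem.List.sorted_id_eq_sorted_id_iff_perm]

-- ===== VERDICT (by name: the statement is the Claim_ definition above) =====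
theorem grabscrab4_spec : Claim_equal_grabscrab4 := by
  intro s p _
  unfold Spec_grabscrab4 grabscrab4 grabscrab4_alt
  simp only []
  have hfun : (fun (r : List String) (num : Int) =>
        let pd := PySem.List.pyGetD (p.map (fun x => pvMakeD x.toList)) num (pvMakeD "".toList)
        let check := pvCheckLoop pd.items (pvMakeD s.toList) && pvCheckLoop (pvMakeD s.toList).items pd
        if check then r ++ [PySem.List.pyGetD p num ""] else r)
      = (fun (r : List String) (num : Int) =>
        if ((PySem.List.sorted (PySem.List.pyGetD p num "").toList (fun c => c) false)
              == (PySem.List.sorted s.toList (fun c => c) false))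
          then r ++ [PySem.List.pyGetD p num ""] else r) := by
    funext r num
    simp only []
    rw [PySem.List.pyGetD_map (fun x => pvMakeD x.toList) p num "", check_eq_sorted]
  rw [hfun]
  rw [PySem.List.foldl_pyRange_pyGetD p ""
      (fun r w' => if ((PySem.List.sorted w'.toList (fun c => c) false)
              == (PySem.List.sorted s.toList (fun c => c) false)) then r ++ [w'] else r)
      [] (le_refl 0)]
  simp only [Int.toNat_zero, List.drop_zero]
  rw [PySem.List.foldl_append_if
      (fun w' => (PySem.List.sorted w'.toList (fun c => c) false)
          == (PySem.List.sorted s.toList (fun c => c) false))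
      (fun w' => w') p []]
  simp only [List.nil_append, List.map_id']
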